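-- pv_equiv track=rewrite | github.com/SellMeFish/TTS-Spammer | utils/crypto/crypto_tools.py | simple_steganography_encode
-- ===== SOURCE A (Python) =====
-- def simple_steganography_encode(text, cover_text):
--     binary_text = ''.join(format(ord(char), '08b') for char in text)
--     binary_text += '1111111111111110'
--
--     result = []
--     binary_index = 0
--
--     for char in cover_text:
--         if binary_index < len(binary_text):
--             if binary_text[binary_index] == '1':
--                 result.append(char.upper())
--             else:
--                 result.append(char.lower())
--             binary_index += 1
--         else:
--             result.append(char)
--
--     return ''.join(result)
-- ===== SOURCE B (Python) =====
-- def simple_steganography_encode(text, cover_text):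
--     # Stream bits arithmetically instead of materializing a bit string:
--     # each text char emits its 8 bits by shifting, then the 16-bit terminator,
--     # each bit consuming one cover character; the leftover cover is copied whole.
--     out = []
--     pos = 0
--     n = len(cover_text)
--
--     def emit(bit):
--         nonlocal pos
--         if pos < n:
--             c = cover_text[pos]
--             out.append(c.upper() if bit else c.lower())
--             pos += 1
--
--     for ch in text:
--         code = ord(ch)
--         for k in range(7, -1, -1):
--             emit((code >> k) & 1)
--     for _ in range(15):
--         emit(1)
--     emit(0)
--     out.append(cover_text[pos:])
--     return ''.join(out)
-- ===== Notes on version B (the rewrite author's own statement) =====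
-- stated objective: alternative
-- what changed: B never materializes the bit string: it streams bits arithmetically ((code >> k) & 1 per text character, then the 16-bit terminator) through an emit step that consumes one cover character per bit, and copies the leftover cover in one slice, instead of A's single loop over cover indexing a precomputed binary string with a per-char bound check.
import Mathlib
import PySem

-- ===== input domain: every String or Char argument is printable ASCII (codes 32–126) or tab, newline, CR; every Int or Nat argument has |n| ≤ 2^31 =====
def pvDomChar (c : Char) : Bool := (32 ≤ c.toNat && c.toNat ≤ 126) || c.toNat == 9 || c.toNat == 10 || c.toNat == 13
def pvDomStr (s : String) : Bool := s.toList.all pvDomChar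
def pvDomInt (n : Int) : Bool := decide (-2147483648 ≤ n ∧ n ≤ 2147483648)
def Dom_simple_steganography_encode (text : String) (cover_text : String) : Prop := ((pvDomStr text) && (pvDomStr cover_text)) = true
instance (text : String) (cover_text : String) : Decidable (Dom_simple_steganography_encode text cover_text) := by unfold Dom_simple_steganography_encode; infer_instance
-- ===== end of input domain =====

-- B streams bits arithmetically (shift/testBit per text char, then the terminator),
-- each bit consuming one cover character; no bit string is materialized and the
-- leftover cover is appended whole — a different decomposition, same cost.

-- ===== PORT A =====
-- format(ord(char), '08b'): the 8-bit binary digits of a character code (< 256 on Dom)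
def pvByteBits (n : Nat) : List Char :=
  (List.range 8).map (fun k => if n.testBit (7 - k) then '1' else '0')

-- the '1111111111111110' sentinel appended to the bit string
def pvSentinel : List Char :=
  ['1','1','1','1','1','1','1','1','1','1','1','1','1','1','1','0']

-- the for-loop over cover_text with state (result, binary_index)
def pvLoopA (bits : List Char) : List Char → List Char → Nat → List Char
  | [], res, _ => res
  | c :: rest, res, i =>
    if i < bits.length then
      if bits.getD i ' ' = '1' then
        pvLoopA bits rest (res ++ [PySem.Chars.upperChar c]) (i + 1)
      else
        pvLoopA bits rest (res ++ [PySem.Chars.lowerChar c]) (i + 1)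
    else
      pvLoopA bits rest (res ++ [c]) i

def simple_steganography_encode (text : String) (cover_text : String) : String :=
  let bits := (text.toList.flatMap (fun c => pvByteBits c.toNat)) ++ pvSentinel
  String.ofList (pvLoopA bits cover_text.toList [] 0)

-- ===== PORT B =====
-- the bits of one character code, streamed as Bools: (code >> k) & 1 for k = 7..0
def pvCharBitsB (n : Nat) : List Bool :=
  (List.range 8).map (fun k => n.testBit (7 - k))

-- emit(bit): consume one cover char if any is left, casing it by the bit
def pvEmitB (st : List Char × List Char) (bit : Bool) : List Char × List Char :=
  match st with
  | (out, []) => (out, [])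
  | (out, c :: rest) =>
      (out ++ [if bit then PySem.Chars.upperChar c else PySem.Chars.lowerChar c], rest)

def pvEmitBitsB (st : List Char × List Char) (bs : List Bool) : List Char × List Char :=
  bs.foldl pvEmitB st

def simple_steganography_encode_alt (text : String) (cover_text : String) : String :=
  let st1 := text.toList.foldl (fun st ch => pvEmitBitsB st (pvCharBitsB ch.toNat)) ([], cover_text.toList)
  let st2 := pvEmitBitsB st1 (List.replicate 15 true ++ [false])
  String.ofList (st2.1 ++ st2.2)

-- ===== PRECONDITION & SPEC =====
def Spec_simple_steganography_encode (text : String) (cover_text : String) (out : String) : Prop := out = simple_steganography_encode_alt text cover_text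
instance (text : String) (cover_text : String) (out : String) : Decidable (Spec_simple_steganography_encode text cover_text out) := by unfold Spec_simple_steganography_encode; infer_instance

-- ===== CLAIM (what is proved, stated in full; the proofs are below) =====
def Claim_equal_simple_steganography_encode : Prop := ∀ (text : String) (cover_text : String), Dom_simple_steganography_encode text cover_text → Spec_simple_steganography_encode text cover_text (simple_steganography_encode text cover_text)

-- ===== LEMMAS AND PROOFS =====

-- Bool bit → '1'/'0' character
def pvBitCh (b : Bool) : Char := if b then '1' else '0'

-- characterization of A's loop: cased zip prefix plus untouched tail
set_option maxRecDepth 4096 in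
lemma pvLoopA_eq (bits : List Char) (cover : List Char) :
    ∀ (i : Nat) (res : List Char),
      pvLoopA bits cover res i =
        res ++ ((cover.zip (bits.drop i)).map
          (fun p => if p.2 = '1' then PySem.Chars.upperChar p.1 else PySem.Chars.lowerChar p.1))
          ++ cover.drop (bits.length - i) := by
  induction cover with
  | nil => intro i res; simp [pvLoopA]
  | cons c rest ih =>
    intro i res
    by_cases h : i < bits.length
    · have hdrop : bits.drop i = bits[i] :: bits.drop (i + 1) :=
        List.drop_eq_getElem_cons h
      have hgetD : bits.getD i ' ' = bits[i] := List.getD_eq_getElem _ _ h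
      have hsub : bits.length - i = (bits.length - (i + 1)) + 1 := by omega
      by_cases hb : bits[i] = '1'
      · have step : pvLoopA bits (c :: rest) res i =
            pvLoopA bits rest (res ++ [PySem.Chars.upperChar c]) (i + 1) := by
          simp only [pvLoopA]; rw [if_pos h, hgetD, if_pos hb]
        rw [step, ih, hdrop, hsub]
        simp [hb, -List.getElem_cons_drop]
      · have step : pvLoopA bits (c :: rest) res i =
            pvLoopA bits rest (res ++ [PySem.Chars.lowerChar c]) (i + 1) := by
          simp only [pvLoopA]; rw [if_pos h, hgetD, if_neg hb]
        rw [step, ih, hdrop, hsub]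
        simp [hb, -List.getElem_cons_drop]
    · have hdrop : bits.drop i = [] := List.drop_eq_nil_of_le (by omega)
      have hsub : bits.length - i = 0 := by omega
      have step : pvLoopA bits (c :: rest) res i = pvLoopA bits rest (res ++ [c]) i := by
        simp only [pvLoopA]; rw [if_neg h]
      rw [step, ih, hdrop, hsub]
      simp

-- characterization of B's emit stream: cased zip prefix, remaining cover dropped
lemma pvEmitBitsB_eq (bs : List Bool) :
    ∀ (out cover : List Char),
      pvEmitBitsB (out, cover) bs =
        (out ++ (cover.zip bs).map
          (fun p => if p.2 then PySem.Chars.upperChar p.1 else PySem.Chars.lowerChar p.1),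
         cover.drop bs.length) := by
  induction bs with
  | nil => intro out cover; simp [pvEmitBitsB]
  | cons b bs ih =>
    intro out cover
    cases cover with
    | nil =>
        have : pvEmitBitsB (out, ([] : List Char)) (b :: bs) = pvEmitBitsB (out, []) bs := rfl
        rw [this, ih]; simp
    | cons c rest =>
        have : pvEmitBitsB (out, c :: rest) (b :: bs) =
            pvEmitBitsB (out ++ [if b then PySem.Chars.upperChar c else PySem.Chars.lowerChar c], rest) bs := rfl
        rw [this, ih]; simp

lemma pvEmitBitsB_append (st : List Char × List Char) (bs1 bs2 : List Bool) :
    pvEmitBitsB st (bs1 ++ bs2) = pvEmitBitsB (pvEmitBitsB st bs1) bs2 := by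
  simp [pvEmitBitsB, List.foldl_append]

-- folding emit over the text chars = emitting the concatenated bit stream
lemma pvFoldEmit_eq (l : List Char) :
    ∀ (st : List Char × List Char),
      l.foldl (fun st ch => pvEmitBitsB st (pvCharBitsB ch.toNat)) st =
        pvEmitBitsB st (l.flatMap (fun ch => pvCharBitsB ch.toNat)) := by
  induction l with
  | nil => intro st; simp [pvEmitBitsB]
  | cons c rest ih => intro st; simp [List.foldl_cons, ih, pvEmitBitsB_append]

-- A's char bits are B's Bool bits rendered as '1'/'0'
lemma pvByteBits_eq_map (n : Nat) : pvByteBits n = (pvCharBitsB n).map pvBitCh := by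
  simp [pvByteBits, pvCharBitsB, pvBitCh, List.map_map, Function.comp]

lemma pvSentinel_eq_map : pvSentinel = (List.replicate 15 true ++ [false]).map pvBitCh := by
  decide

-- casing by the rendered char equals casing by the Bool bit
lemma pvZipMap_bridge (cover : List Char) (bs : List Bool) :
    ((cover.zip (bs.map pvBitCh)).map
      (fun p => if p.2 = '1' then PySem.Chars.upperChar p.1 else PySem.Chars.lowerChar p.1)) =
    ((cover.zip bs).map
      (fun p => if p.2 then PySem.Chars.upperChar p.1 else PySem.Chars.lowerChar p.1)) := by
  rw [List.zip_map_right, List.map_map]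
  refine List.map_congr_left ?_
  rintro ⟨c, b⟩ _
  cases b <;> simp [pvBitCh]

-- ===== VERDICT (by name: the statement is the Claim_ definition above) =====
theorem simple_steganography_encode_spec : Claim_equal_simple_steganography_encode := by
  intro text cover_text _
  unfold Spec_simple_steganography_encode
  unfold simple_steganography_encode simple_steganography_encode_alt
  have hbits : (text.toList.flatMap (fun c => pvByteBits c.toNat)) ++ pvSentinel =
      ((text.toList.flatMap (fun ch => pvCharBitsB ch.toNat)) ++ (List.replicate 15 true ++ [false])).map pvBitCh := by
    simp [pvByteBits_eq_map, pvSentinel_eq_map, List.map_flatMap]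
  simp only [pvFoldEmit_eq]
  rw [← pvEmitBitsB_append, pvEmitBitsB_eq, pvLoopA_eq, hbits, List.drop_zero,
    Nat.sub_zero, pvZipMap_bridge, List.length_map, List.nil_append]
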